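-- pv_equiv track=rewrite | github.com/Rajat158/Leetcode-Solutions | daily questions/2218. Maximum Value of K Coins From Piles.py | maxValueOfCoins
-- ===== SOURCE A (Python) =====
-- from typing import List
--
-- def maxValueOfCoins(piles: List[List[int]], k: int) -> int:
--     n = len(piles)
--     dp = [[0 for _ in range(k + 1)] for _ in range(n + 1)]
--     for i in range(1, n + 1):
--         for coins in range(0, k + 1):
--             currSum = 0
--             for currCoins in range(0, min(len(piles[i - 1]), coins) + 1):
--                 if currCoins > 0:
--                     currSum += piles[i - 1][currCoins - 1]
--                 dp[i][coins] = max(dp[i][coins], dp[i - 1][coins - currCoins] + currSum)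
--     return dp[n][k]
-- ===== SOURCE B (Python) =====
-- from typing import List
--
-- def maxValueOfCoins(piles: List[List[int]], k: int) -> int:
--     def best_row(i):
--         # best total for each budget 0..k using only the first i piles
--         if i == 0:
--             return [0] * (k + 1)
--         prev = best_row(i - 1)
--         pile = piles[i - 1]
--         pre = [0]
--         for x in pile:
--             pre.append(pre[-1] + x)
--         return [max(pre[t] + prev[c - t] for t in range(min(len(pile), c) + 1))
--                 for c in range(k + 1)]
--     return best_row(len(piles))[k]
-- ===== Notes on version B (the rewrite author's own statement) =====
-- stated objective: alternative
-- what changed: Replaces the bottom-up (n+1)x(k+1) table with in-place running-sum max updates by a top-down recursion over the pile-list prefix that builds one budget row per call, using an explicit prefix-sum list and a max over a comprehension.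
import Mathlib
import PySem

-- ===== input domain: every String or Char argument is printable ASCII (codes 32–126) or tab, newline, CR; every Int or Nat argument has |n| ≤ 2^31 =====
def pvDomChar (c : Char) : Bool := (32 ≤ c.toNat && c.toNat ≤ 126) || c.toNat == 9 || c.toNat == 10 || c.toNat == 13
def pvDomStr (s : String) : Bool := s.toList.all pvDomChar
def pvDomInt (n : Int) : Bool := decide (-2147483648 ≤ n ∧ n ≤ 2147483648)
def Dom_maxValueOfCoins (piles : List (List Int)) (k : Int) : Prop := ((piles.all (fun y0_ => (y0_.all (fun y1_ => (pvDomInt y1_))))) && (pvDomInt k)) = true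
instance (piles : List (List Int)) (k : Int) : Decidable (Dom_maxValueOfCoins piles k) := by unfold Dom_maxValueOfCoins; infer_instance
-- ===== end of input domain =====

-- B re-implements the group knapsack as a top-down recursion over the pile-list prefix building one
-- budget row per call (prefix-sum list + max over a comprehension) instead of A's bottom-up 2D table
-- with in-place running-sum max updates; same asymptotic cost. Equality of RETURN values is proved
-- for all inputs with 0 ≤ k (for k < 0 both Pythons raise IndexError).

-- ===== PORT A =====
-- Transliteration of A; each Python 'for' loop is one named foldl body (stepT/stepC/stepI, the
-- innermost/coins/outer loops).  dp is the Python list-of-lists, read/written with pyGetD/pySetD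
-- (every read/write A performs is at an in-range index when 0 ≤ k, where these are exact).
def stepT (piles : List (List Int)) (i coins : Int) (st : Int × List (List Int)) (currCoins : Int) :
    Int × List (List Int) :=
  let currSum : Int :=
    if currCoins > 0 then st.1 + PySem.List.pyGetD (PySem.List.pyGetD piles (i - 1) []) (currCoins - 1) 0
    else st.1
  let v : Int :=
    max (PySem.List.pyGetD (PySem.List.pyGetD st.2 i []) coins 0)
        (PySem.List.pyGetD (PySem.List.pyGetD st.2 (i - 1) []) (coins - currCoins) 0 + currSum)
  (currSum, PySem.List.pySetD st.2 i (PySem.List.pySetD (PySem.List.pyGetD st.2 i []) coins v))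

def stepC (piles : List (List Int)) (i : Int) (dp : List (List Int)) (coins : Int) : List (List Int) :=
  ((PySem.List.pyRange 0 (min ((PySem.List.pyGetD piles (i - 1) []).length : Int) coins + 1) 1).foldl
    (stepT piles i coins) ((0 : Int), dp)).2

def stepI (piles : List (List Int)) (k : Int) (dp : List (List Int)) (i : Int) : List (List Int) :=
  (PySem.List.pyRange 0 (k + 1) 1).foldl (stepC piles i) dp

def maxValueOfCoins (piles : List (List Int)) (k : Int) : Int :=
  let n : Int := piles.length
  let dp0 : List (List Int) :=
    (PySem.List.pyRange 0 (n + 1) 1).map (fun _ => (PySem.List.pyRange 0 (k + 1) 1).map (fun _ => (0 : Int)))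
  let dp := (PySem.List.pyRange 1 (n + 1) 1).foldl (stepI piles k) dp0
  PySem.List.pyGetD (PySem.List.pyGetD dp n []) k 0

-- ===== PORT B =====
-- pre = [0]; for x in pile: pre.append(pre[-1] + x)
def preSums (pile : List Int) : List Int :=
  pile.foldl (fun p x => p ++ [PySem.List.pyGetD p (-1) 0 + x]) [(0 : Int)]

-- best_row(i): best total for each budget 0..k using only the first i piles.
-- The inner max(...) is over a nonempty list whenever 0 ≤ c (always the case for c in range(k+1)),
-- so Python's max never sees an empty sequence; ported as max?.getD 0.
def bestRow (piles : List (List Int)) (k : Int) : Nat → List Int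
  | 0 => PySem.List.pyRepeat [(0 : Int)] (k + 1)
  | i + 1 =>
    let prev := bestRow piles k i
    let pile := PySem.List.pyGetD piles ((i : Int) + 1 - 1) []
    let pre := preSums pile
    (PySem.List.pyRange 0 (k + 1) 1).map (fun c =>
      ((PySem.List.pyRange 0 (min (pile.length : Int) c + 1) 1).map
          (fun t => PySem.List.pyGetD pre t 0 + PySem.List.pyGetD prev (c - t) 0))
        |> (fun lst => (PySem.List.max? lst (fun y => y)).getD 0))

def maxValueOfCoins_alt (piles : List (List Int)) (k : Int) : Int :=
  PySem.List.pyGetD (bestRow piles k piles.length) k 0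

-- ===== PRECONDITION & SPEC =====
-- For k < 0 the Python A raises IndexError (dp[n] is the empty list); excluded, B raises there too.
def Pre_maxValueOfCoins (piles : List (List Int)) (k : Int) : Prop := 0 ≤ k
instance (piles : List (List Int)) (k : Int) : Decidable (Pre_maxValueOfCoins piles k) := by
  unfold Pre_maxValueOfCoins; infer_instance

def pvWitness_maxValueOfCoins : List (List Int) × Int := ([[1, 100, 3], [7, 8, 9], []], 2)

def Spec_maxValueOfCoins (piles : List (List Int)) (k : Int) (out : Int) : Prop := out = maxValueOfCoins_alt piles k
instance (piles : List (List Int)) (k : Int) (out : Int) : Decidable (Spec_maxValueOfCoins piles k out) := by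
  unfold Spec_maxValueOfCoins; infer_instance

-- ===== CLAIM (what is proved, stated in full; the proofs are below) =====
def Claim_equal_maxValueOfCoins : Prop := ∀ (piles : List (List Int)) (k : Int), Dom_maxValueOfCoins piles k → Pre_maxValueOfCoins piles k → Spec_maxValueOfCoins piles k (maxValueOfCoins piles k)

-- ===== LEMMAS AND PROOFS =====

-- the all-zero budget row
def zRow (k : Int) : List Int := List.replicate (k + 1).toNat (0 : Int)

-- the table A's outer loop maintains: rows 0..i are B's rows, the rest still zero
def tbl (piles : List (List Int)) (k : Int) (i : Nat) : List (List Int) :=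
  (List.range (piles.length + 1)).map (fun j => if j ≤ i then bestRow piles k j else zRow k)

-- the partial row A's coins loop maintains: entries below c done, the rest still zero
def pRow (piles : List (List Int)) (k : Int) (i : Nat) (c : Nat) : List Int :=
  (List.range (k + 1).toNat).map (fun c' => if c' < c then (bestRow piles k (i + 1)).getD c' 0 else 0)

lemma bestRow_zero (piles : List (List Int)) (k : Int) : bestRow piles k 0 = zRow k := by
  simp [bestRow, PySem.List.pyRepeat_singleton, zRow]

lemma length_bestRow (piles : List (List Int)) (k : Int) (i : Nat) :
    (bestRow piles k i).length = (k + 1).toNat := by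
  cases i with
  | zero => simp [bestRow, PySem.List.pyRepeat_singleton]
  | succ j => simp [bestRow, PySem.List.length_pyRange_one]

lemma preSums_eq (pile : List Int) :
    preSums pile = (List.range (pile.length + 1)).map (fun t => (pile.take t).sum) := by
  induction pile using List.reverseRecOn with
  | nil => simp [preSums]
  | append_singleton xs x ih =>
    have h1 : preSums (xs ++ [x]) = preSums xs ++ [PySem.List.pyGetD (preSums xs) (-1) 0 + x] := by
      simp [preSums, List.foldl_append]
    have hlast : PySem.List.pyGetD (preSums xs) (-1) 0 = xs.sum := by
      rw [ih, List.range_succ, List.map_append, List.map_cons, List.map_nil,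
        PySem.List.pyGetD_neg_one_append_singleton, List.take_length]
    rw [h1, hlast, ih]
    have hr2 : List.range ((xs ++ [x]).length + 1) = List.range (xs.length + 1) ++ [xs.length + 1] := by
      simp [List.range_succ]
    rw [hr2, List.map_append, List.map_cons, List.map_nil]
    congr 1
    · apply List.map_congr_left
      intro t ht
      have : t ≤ xs.length := by have := List.mem_range.mp ht; omega
      simp [List.take_append_of_le_length this]
    · simp [List.take_of_length_le (by simp : (xs ++ [x]).length ≤ xs.length + 1), List.sum_append]

lemma preSums_getD (pile : List Int) (t : Int) (h0 : 0 ≤ t) (ht : t ≤ (pile.length : Int)) :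
    PySem.List.pyGetD (preSums pile) t 0 = (pile.take t.toNat).sum := by
  rw [preSums_eq]
  rw [PySem.List.pyGetD_eq_getElem _ _ h0 (by simp; omega)]
  simp

lemma bestRow_succ_getD (piles : List (List Int)) (k : Int) (i : Nat) (c : Int)
    (h0 : 0 ≤ c) (hc : c ≤ k) :
    PySem.List.pyGetD (bestRow piles k (i + 1)) c 0 =
      ((PySem.List.max?
        ((PySem.List.pyRange 0 (min ((PySem.List.pyGetD piles ((i : Int) + 1 - 1) []).length : Int) c + 1) 1).map
          (fun t => PySem.List.pyGetD (preSums (PySem.List.pyGetD piles ((i : Int) + 1 - 1) [])) t 0 +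
                    PySem.List.pyGetD (bestRow piles k i) (c - t) 0)) (fun y => y)).getD 0) := by
  show PySem.List.pyGetD ((PySem.List.pyRange 0 (k + 1) 1).map _) c 0 = _
  rw [PySem.List.pyGetD_map_pyRange_of_nonneg _ _ _ _ h0 (by omega)]

lemma bestRow_nonneg (piles : List (List Int)) (k : Int) (i : Nat) (c : Int) (h0 : 0 ≤ c) :
    0 ≤ PySem.List.pyGetD (bestRow piles k i) c 0 := by
  induction i generalizing c with
  | zero =>
    rw [show bestRow piles k 0 = List.replicate (k+1).toNat 0 from PySem.List.pyRepeat_singleton _ _]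
    by_cases h : c < ((k+1).toNat : Int)
    · rw [PySem.List.pyGetD_eq_getElem _ _ h0 (by simpa using h)]; simp
    · rw [show c = ((c.toNat : Nat) : Int) by omega, PySem.List.pyGetD_natCast,
        List.getD_eq_default]
      simp; omega
  | succ j ih =>
    by_cases hc : c ≤ k
    · rw [bestRow_succ_getD piles k j c h0 hc]
      set pile := PySem.List.pyGetD piles ((j : Int) + 1 - 1) [] with hp
      set lst := ((PySem.List.pyRange 0 (min ((pile).length : Int) c + 1) 1).map
          (fun t => PySem.List.pyGetD (preSums pile) t 0 +
                    PySem.List.pyGetD (bestRow piles k j) (c - t) 0)) with hl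
      have hmem : (PySem.List.pyGetD (preSums pile) 0 0 + PySem.List.pyGetD (bestRow piles k j) (c - 0) 0) ∈ lst := by
        rw [hl]
        apply List.mem_map_of_mem
        rw [PySem.List.mem_pyRange_one]
        constructor
        · omega
        · have : (0:Int) ≤ (pile.length : Int) := by positivity
          omega
      have hne : lst ≠ [] := by intro h; rw [h] at hmem; exact (List.not_mem_nil) hmem
      obtain ⟨m, hm⟩ : ∃ m, PySem.List.max? lst (fun y => y) = some m := by
        cases hmax : PySem.List.max? lst (fun y => y) with
        | none => exact absurd ((PySem.List.max?_eq_none_iff _ _).mp hmax) hne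
        | some m => exact ⟨m, rfl⟩
      rw [hm]
      have h1 : PySem.List.pyGetD (preSums pile) 0 0 + PySem.List.pyGetD (bestRow piles k j) (c - 0) 0 ≤ m :=
        PySem.List.max?_isMax hm _ hmem
      have h2 : PySem.List.pyGetD (preSums pile) 0 0 = 0 := by
        rw [preSums_getD pile 0 le_rfl (by positivity)]; simp
      have h3 := ih (c - 0) (by omega)
      simp only [Option.getD_some]
      omega
    · rw [show c = ((c.toNat : Nat) : Int) by omega, PySem.List.pyGetD_natCast,
        List.getD_eq_default]
      · simp [bestRow, PySem.List.length_pyRange_one]; omega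

-- max(0, x0, ...) over a nonempty list whose head is nonnegative is Python's max of the list
lemma foldl_max_zero (x : Int) (rest : List Int) (hx : 0 ≤ x) :
    List.foldl max 0 (x :: rest) = ((PySem.List.max? (x :: rest) (fun y => y)).getD 0) := by
  rw [PySem.List.max?_id_cons]
  simp [List.foldl, max_eq_right hx]

lemma tbl_getD (piles : List (List Int)) (k : Int) (i j : Nat) (hj : j < piles.length + 1) :
    PySem.List.pyGetD (tbl piles k i) (j : Int) [] = if j ≤ i then bestRow piles k j else zRow k := by
  rw [PySem.List.pyGetD_natCast, tbl]
  exact PySem.List.getD_map_range _ _ _ _ hj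

lemma length_tbl (piles : List (List Int)) (k : Int) (i : Nat) :
    (tbl piles k i).length = piles.length + 1 := by simp [tbl]

lemma length_pRow (piles : List (List Int)) (k : Int) (i c : Nat) :
    (pRow piles k i c).length = (k + 1).toNat := by simp [pRow]

lemma pRow_zero (piles : List (List Int)) (k : Int) (i : Nat) : pRow piles k i 0 = zRow k := by
  simp [pRow, zRow, List.map_const']

lemma pRow_full (piles : List (List Int)) (k : Int) (i c : Nat) (hc : (k + 1).toNat ≤ c) :
    pRow piles k i c = bestRow piles k (i + 1) := by
  apply List.ext_getElem
  · simp [pRow, length_bestRow]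
  · intro n h1 h2
    simp only [pRow, List.getElem_map, List.getElem_range]
    have hn : n < (k+1).toNat := by simpa [pRow] using h1
    rw [if_pos (by omega), List.getD_eq_getElem _ _ (by rw [length_bestRow]; omega)]

lemma pRow_getD_self (piles : List (List Int)) (k : Int) (i c : Nat) (hc : c < (k + 1).toNat) :
    PySem.List.pyGetD (pRow piles k i c) (c : Int) 0 = 0 := by
  rw [PySem.List.pyGetD_natCast, List.getD_eq_getElem _ _ (by simp [pRow]; omega)]
  simp [pRow]

lemma pRow_set (piles : List (List Int)) (k : Int) (i c : Nat) :
    (pRow piles k i c).set c (PySem.List.pyGetD (bestRow piles k (i + 1)) (c : Int) 0) =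
      pRow piles k i (c + 1) := by
  apply List.ext_getElem
  · simp [pRow]
  · intro n h1 h2
    have hn : n < (k+1).toNat := by simpa [pRow] using h2
    rw [List.getElem_set]
    by_cases h : c = n
    · subst h
      rw [if_pos rfl, PySem.List.pyGetD_natCast]
      simp only [pRow, List.getElem_map, List.getElem_range, if_pos (by omega : c < c + 1)]
    · rw [if_neg h]
      simp only [pRow, List.getElem_map, List.getElem_range]
      by_cases h3 : n < c
      · rw [if_pos h3, if_pos (by omega)]
      · rw [if_neg h3, if_neg (by omega)]

lemma tbl_set (piles : List (List Int)) (k : Int) (i : Nat) :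
    PySem.List.pySetD (tbl piles k i) ((i : Int) + 1) (bestRow piles k (i + 1)) = tbl piles k (i + 1) := by
  rw [show ((i : Int) + 1) = ((i + 1 : Nat) : Int) by push_cast; ring, PySem.List.pySetD_natCast]
  apply List.ext_getElem
  · simp [tbl]
  · intro n h1 h2
    have hn : n < piles.length + 1 := by simpa [tbl] using h2
    rw [List.getElem_set]
    by_cases h : i + 1 = n
    · subst h; simp [tbl]
    · rw [if_neg h]
      simp only [tbl, List.getElem_map, List.getElem_range]
      by_cases h2 : n ≤ i
      · rw [if_pos h2, if_pos (by omega)]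
      · rw [if_neg h2, if_neg (by omega)]

lemma dp0_eq_tbl (piles : List (List Int)) (k : Int) :
    (PySem.List.pyRange 0 ((piles.length : Int) + 1) 1).map
        (fun _ => (PySem.List.pyRange 0 (k + 1) 1).map (fun _ => (0 : Int))) = tbl piles k 0 := by
  have hz : (PySem.List.pyRange 0 (k + 1) 1).map (fun _ => (0 : Int)) = zRow k := by
    rw [List.map_const', PySem.List.length_pyRange_one]; simp [zRow]
  rw [hz]
  apply List.ext_getElem
  · simp [tbl, PySem.List.length_pyRange_one]
  · intro n h1 h2
    have hn : n < piles.length + 1 := by simpa [tbl] using h2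
    simp only [List.getElem_map, tbl, List.getElem_range]
    by_cases h : n ≤ 0
    · rw [if_pos h]; have : n = 0 := by omega
      subst this; rw [bestRow_zero]
    · rw [if_neg h]

-- the innermost loop, processed up to t: running sum is the prefix sum, the (i+1,c) entry is the running max
lemma stepT_fold (piles : List (List Int)) (k : Int) (i : Nat) (hi : i < piles.length)
    (c : Int) (h0 : 0 ≤ c) (hck : c ≤ k)
    (dp : List (List Int)) (rc : List Int)
    (hlen : dp.length = piles.length + 1)
    (hrc_len : rc.length = (k + 1).toNat)
    (hrow : PySem.List.pyGetD dp ((i : Int) + 1) [] = rc)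
    (hrc : PySem.List.pyGetD rc c 0 = 0)
    (hprev : PySem.List.pyGetD dp (i : Int) [] = bestRow piles k i)
    (t : Nat) (htT : (t : Int) ≤ min ((piles[i].length : Int)) c) :
    (PySem.List.pyRange 0 ((t : Int) + 1) 1).foldl (stepT piles ((i : Int) + 1) c) ((0 : Int), dp) =
      ((piles[i].take t).sum,
        PySem.List.pySetD dp ((i : Int) + 1)
          (PySem.List.pySetD rc c
            (((PySem.List.pyRange 0 ((t : Int) + 1) 1).map
                (fun t' => (piles[i].take t'.toNat).sum +
                           PySem.List.pyGetD (bestRow piles k i) (c - t') 0)).foldl max 0))) := by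
  have hi1lt : (i : Int) + 1 < (dp.length : Int) := by rw [hlen]; push_cast; omega
  have hi1nn : (0:Int) ≤ (i : Int) + 1 := by positivity
  have hgetrow : ∀ (X : List Int),
      PySem.List.pyGetD (PySem.List.pySetD dp ((i : Int) + 1) X) ((i : Int) + 1) [] = X := by
    intro X
    rw [show ((i : Int) + 1) = ((i + 1 : Nat) : Int) by push_cast; ring,
      PySem.List.pyGetD_pySetD_natCast _ _ _ _ _ (by omega)]
    simp
  have hgetprev : ∀ (X : List Int),
      PySem.List.pyGetD (PySem.List.pySetD dp ((i : Int) + 1) X) ((i : Int) + 1 - 1) [] = bestRow piles k i := by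
    intro X
    rw [show ((i : Int) + 1 - 1) = ((i : Nat) : Int) by push_cast; ring,
      show ((i : Int) + 1) = ((i + 1 : Nat) : Int) by push_cast; ring,
      PySem.List.pyGetD_pySetD_natCast _ _ _ _ _ (by omega), if_neg (by omega)]
    exact hprev
  have hsetset : ∀ (X Y : List Int),
      PySem.List.pySetD (PySem.List.pySetD dp ((i : Int) + 1) X) ((i : Int) + 1) Y
        = PySem.List.pySetD dp ((i : Int) + 1) Y := by
    intro X Y
    rw [PySem.List.pySetD_of_nonneg _ _ hi1nn, PySem.List.pySetD_of_nonneg _ _ hi1nn,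
      PySem.List.pySetD_of_nonneg _ _ hi1nn, List.set_set]
  have hrcset : ∀ (a b : Int),
      PySem.List.pySetD (PySem.List.pySetD rc c a) c b = PySem.List.pySetD rc c b := by
    intro a b
    rw [PySem.List.pySetD_of_nonneg _ _ h0, PySem.List.pySetD_of_nonneg _ _ h0,
      PySem.List.pySetD_of_nonneg _ _ h0, List.set_set]
  have hrcget : ∀ (a : Int), PySem.List.pyGetD (PySem.List.pySetD rc c a) c 0 = a := by
    intro a
    rw [show c = ((c.toNat : Nat) : Int) by omega, PySem.List.pyGetD_pySetD_natCast _ _ _ _ _ (by omega)]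
    simp
  induction t with
  | zero =>
    rw [show ((0:Nat):Int) + 1 = 0 + 1 by norm_num, PySem.List.pyRange_one_cons (by norm_num),
      PySem.List.pyRange_one_eq_nil (by norm_num)]
    simp only [List.foldl_cons, List.foldl_nil, List.map_cons, List.map_nil, stepT]
    rw [if_neg (by omega)]
    simp only [hrow, hrc]
    have hprev2 : dp[i]?.getD [] = bestRow piles k i := by
      rw [← hprev, PySem.List.pyGetD_natCast]; rfl
    norm_num [hprev2]
  | succ t ih =>
    have ht' : (t : Int) ≤ min ((piles[i].length : Int)) c := by push_cast at htT ⊢; omega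
    have hpeel : PySem.List.pyRange 0 (((t+1 : Nat) : Int) + 1) 1
        = PySem.List.pyRange 0 ((t : Int) + 1) 1 ++ [((t : Int) + 1)] := by
      rw [show (((t+1 : Nat) : Int) + 1) = ((t : Int) + 1) + 1 by push_cast; ring]
      exact PySem.List.pyRange_one_succ_right (by positivity)
    rw [hpeel, List.foldl_append, ih ht', List.foldl_cons, List.foldl_nil]
    simp only [stepT]
    rw [if_pos (by omega)]
    have htlen : t < piles[i].length := by
      have := htT; push_cast at this; omega
    have hpget : PySem.List.pyGetD piles ((i : Int) + 1 - 1) [] = piles[i] := by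
      rw [show ((i : Int) + 1 - 1) = ((i : Nat) : Int) by push_cast; ring,
        PySem.List.pyGetD_natCast, List.getD_eq_getElem _ _ hi]
    have hsum : (piles[i].take t).sum + PySem.List.pyGetD (PySem.List.pyGetD piles ((i : Int) + 1 - 1) []) (((t : Int) + 1) - 1) 0
        = (piles[i].take (t+1)).sum := by
      rw [hpget, show ((t : Int) + 1 - 1) = ((t : Nat) : Int) by ring, PySem.List.pyGetD_natCast,
        List.getD_eq_getElem _ _ htlen, List.take_add_one, List.sum_append]
      simp [List.getElem?_eq_getElem htlen]
    simp only [hgetrow, hgetprev, hrcget, hsetset, hrcset, hsum]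
    rw [List.map_append, List.foldl_append]
    simp only [List.map_cons, List.map_nil, List.foldl_cons, List.foldl_nil]
    rw [show (((t : Int) + 1)).toNat = t + 1 by omega,
      add_comm (PySem.List.pyGetD (bestRow piles k i) (c - ((t:Int)+1)) 0)]

-- one full innermost loop computes B's row entry
lemma stepC_eq (piles : List (List Int)) (k : Int) (i : Nat) (hi : i < piles.length)
    (c : Int) (h0 : 0 ≤ c) (hck : c ≤ k)
    (dp : List (List Int)) (rc : List Int)
    (hlen : dp.length = piles.length + 1)
    (hrc_len : rc.length = (k + 1).toNat)
    (hrow : PySem.List.pyGetD dp ((i : Int) + 1) [] = rc)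
    (hrc : PySem.List.pyGetD rc c 0 = 0)
    (hprev : PySem.List.pyGetD dp (i : Int) [] = bestRow piles k i) :
    stepC piles ((i : Int) + 1) dp c =
      PySem.List.pySetD dp ((i : Int) + 1)
        (PySem.List.pySetD rc c (PySem.List.pyGetD (bestRow piles k (i + 1)) c 0)) := by
  have hpget : PySem.List.pyGetD piles ((i : Int) + 1 - 1) [] = piles[i] := by
    rw [show ((i : Int) + 1 - 1) = ((i : Nat) : Int) by push_cast; ring,
      PySem.List.pyGetD_natCast, List.getD_eq_getElem _ _ hi]
  have hT0 : (0:Int) ≤ min ((piles[i].length : Int)) c := by positivity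
  set T : Int := min ((piles[i].length : Int)) c with hT
  have hTn : ((T.toNat : Nat) : Int) = T := by omega
  have hfold := stepT_fold piles k i hi c h0 hck dp rc hlen hrc_len hrow hrc hprev T.toNat (by omega)
  rw [hTn] at hfold
  have hstep : stepC piles ((i : Int) + 1) dp c =
      (PySem.List.pySetD dp ((i : Int) + 1)
        (PySem.List.pySetD rc c
          (((PySem.List.pyRange 0 (T + 1) 1).map
              (fun t' => (piles[i].take t'.toNat).sum +
                         PySem.List.pyGetD (bestRow piles k i) (c - t') 0)).foldl max 0))) := by
    rw [stepC, hpget, ← hT, hfold]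
  rw [hstep]
  congr 2
  rw [bestRow_succ_getD piles k i c h0 hck, hpget, ← hT]
  have hcons : PySem.List.pyRange 0 (T + 1) 1 = 0 :: PySem.List.pyRange 1 (T + 1) 1 :=
    PySem.List.pyRange_one_cons (by omega)
  have hcong : ∀ t' ∈ PySem.List.pyRange 0 (T + 1) 1,
      (piles[i].take t'.toNat).sum + PySem.List.pyGetD (bestRow piles k i) (c - t') 0
        = PySem.List.pyGetD (preSums piles[i]) t' 0 + PySem.List.pyGetD (bestRow piles k i) (c - t') 0 := by
    intro t' ht'
    obtain ⟨h1, h2⟩ := PySem.List.mem_pyRange_one.mp ht'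
    rw [preSums_getD piles[i] t' h1 (by omega)]
  rw [← List.map_congr_left hcong]
  rw [hcons, List.map_cons]
  rw [foldl_max_zero _ _ (by
    simp only [List.take_zero, List.sum_nil, Int.toNat_zero, zero_add, sub_zero]
    exact bestRow_nonneg piles k i c h0)]

-- the coins loop, processed up to c
lemma stepC_fold (piles : List (List Int)) (k : Int) (hk : 0 ≤ k) (i : Nat) (hi : i < piles.length)
    (c : Nat) (hc : c ≤ (k + 1).toNat) :
    (PySem.List.pyRange 0 (c : Int) 1).foldl (stepC piles ((i : Int) + 1)) (tbl piles k i) =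
      PySem.List.pySetD (tbl piles k i) ((i : Int) + 1) (pRow piles k i c) := by
  induction c with
  | zero =>
    rw [show ((0:Nat):Int) = 0 by norm_num, PySem.List.pyRange_one_eq_nil le_rfl, List.foldl_nil,
      pRow_zero, show ((i : Int) + 1) = ((i + 1 : Nat) : Int) by push_cast; ring,
      PySem.List.pySetD_natCast]
    have hlt : i + 1 < (tbl piles k i).length := by rw [length_tbl]; omega
    have hz : (tbl piles k i)[i+1] = zRow k := by
      simp only [tbl, List.getElem_map, List.getElem_range, if_neg (by omega : ¬ (i + 1 ≤ i))]
    rw [← hz, List.set_getElem_self]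
  | succ c ih =>
    have hc' : c < (k + 1).toNat := by omega
    have hpeel : PySem.List.pyRange 0 ((c+1 : Nat) : Int) 1
        = PySem.List.pyRange 0 (c : Int) 1 ++ [(c : Int)] := by
      rw [show ((c+1 : Nat) : Int) = (c : Int) + 1 by push_cast; ring]
      exact PySem.List.pyRange_one_succ_right (by positivity)
    rw [hpeel, List.foldl_append, ih (by omega), List.foldl_cons, List.foldl_nil]
    have hlen : (PySem.List.pySetD (tbl piles k i) ((i : Int) + 1) (pRow piles k i c)).length
        = piles.length + 1 := by
      rw [PySem.List.pySetD_of_nonneg _ _ (by positivity)]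
      simp [length_tbl]
    have hrow : PySem.List.pyGetD (PySem.List.pySetD (tbl piles k i) ((i : Int) + 1) (pRow piles k i c)) ((i : Int) + 1) []
        = pRow piles k i c := by
      rw [show ((i : Int) + 1) = ((i + 1 : Nat) : Int) by push_cast; ring,
        PySem.List.pyGetD_pySetD_natCast _ _ _ _ _ (by rw [length_tbl]; omega)]
      simp
    have hprev : PySem.List.pyGetD (PySem.List.pySetD (tbl piles k i) ((i : Int) + 1) (pRow piles k i c)) ((i : Nat) : Int) []
        = bestRow piles k i := by
      rw [show ((i : Int) + 1) = ((i + 1 : Nat) : Int) by push_cast; ring,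
        PySem.List.pyGetD_pySetD_natCast _ _ _ _ _ (by rw [length_tbl]; omega), if_neg (by omega),
        tbl_getD piles k i i (by omega), if_pos le_rfl]
    have h := stepC_eq piles k i hi (c : Int) (by positivity) (by omega)
      (PySem.List.pySetD (tbl piles k i) ((i : Int) + 1) (pRow piles k i c)) (pRow piles k i c)
      hlen (length_pRow piles k i c) hrow (pRow_getD_self piles k i c hc') hprev
    rw [h]
    rw [PySem.List.pySetD_of_nonneg (PySem.List.pySetD _ _ _) _ (by positivity : (0:Int) ≤ (i:Int)+1),
      PySem.List.pySetD_of_nonneg (tbl piles k i) _ (by positivity : (0:Int) ≤ (i:Int)+1), List.set_set,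
      ← PySem.List.pySetD_of_nonneg (tbl piles k i) _ (by positivity : (0:Int) ≤ (i:Int)+1)]
    congr 1
    rw [PySem.List.pySetD_natCast, pRow_set piles k i c]

lemma stepI_tbl (piles : List (List Int)) (k : Int) (hk : 0 ≤ k) (i : Nat) (hi : i < piles.length) :
    stepI piles k (tbl piles k i) ((i : Int) + 1) = tbl piles k (i + 1) := by
  have hkn : k + 1 = (((k + 1).toNat : Nat) : Int) := by omega
  rw [stepI, hkn, stepC_fold piles k hk i hi (k+1).toNat le_rfl,
    pRow_full piles k i _ le_rfl, tbl_set]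

lemma outer_fold (piles : List (List Int)) (k : Int) (hk : 0 ≤ k) (i : Nat) (hi : i ≤ piles.length) :
    (PySem.List.pyRange 1 ((i : Int) + 1) 1).foldl (stepI piles k) (tbl piles k 0) = tbl piles k i := by
  induction i with
  | zero => rw [show ((0:Nat):Int) + 1 = 1 by norm_num, PySem.List.pyRange_one_eq_nil le_rfl, List.foldl_nil]
  | succ i ih =>
    have hpeel : PySem.List.pyRange 1 (((i+1 : Nat) : Int) + 1) 1
        = PySem.List.pyRange 1 ((i : Int) + 1) 1 ++ [(i : Int) + 1] := by
      rw [show ((i+1 : Nat) : Int) + 1 = ((i : Int) + 1) + 1 by push_cast; ring]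
      exact PySem.List.pyRange_one_succ_right (by omega)
    rw [hpeel, List.foldl_append, ih (by omega), List.foldl_cons, List.foldl_nil,
      stepI_tbl piles k hk i (by omega)]

-- ===== VERDICT (by name: the statement is the Claim_ definition above) =====
theorem maxValueOfCoins_spec : Claim_equal_maxValueOfCoins := by
  intro piles k _ hk
  show maxValueOfCoins piles k = maxValueOfCoins_alt piles k
  have h := outer_fold piles k hk piles.length le_rfl
  simp only [maxValueOfCoins, maxValueOfCoins_alt]
  rw [dp0_eq_tbl, h, tbl_getD piles k piles.length piles.length (by omega)]
  simp
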